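-- pv_equiv track=rewrite | github.com/RCarnicelli/tgl-api | tgl_core.py | tetrad_pitches
-- ===== SOURCE A (Python) =====
-- NOTES_SHARP = ["C","C#","D","D#","E","F","F#","G","G#","A","A#","B"]
--
-- ENH_EQ = {"Db":"C#", "Eb":"D#", "Gb":"F#", "Ab":"G#", "Bb":"A#"}
--
-- def norm_note(n: str) -> str:
--     return ENH_EQ.get(n, n).upper()
--
-- def note_to_idx(n: str) -> int:
--     return NOTES_SHARP.index(norm_note(n))
--
-- TETRAD_INTERVALS = {
--     "maj7": [0, 4, 7, 11],
--     "min7": [0, 3, 7, 10],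
--     "7":    [0, 4, 7, 10],   # dominante
--     "m7b5": [0, 3, 6, 10],   # meio-diminuto (ø)
--     "dim7": [0, 3, 6, 9],    # diminuto
-- }
--
-- def tetrad_pitches(root: str, quality: str, inversion: int = 0):
--     if quality not in TETRAD_INTERVALS:
--         raise ValueError("quality deve ser: maj7|min7|7|m7b5|dim7")
--     root_idx = note_to_idx(root)
--     ints = TETRAD_INTERVALS[quality]
--     pcs = [(root_idx + x) % 12 for x in ints]  # [1,3,5,7]
--     for _ in range(inversion % 4):
--         pcs = pcs[1:] + pcs[:1]
--     return pcs  # 4 PCs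
-- ===== SOURCE B (Python) =====
-- NOTES_SHARP = ["C","C#","D","D#","E","F","F#","G","G#","A","A#","B"]
--
-- ENH_EQ = {"Db":"C#", "Eb":"D#", "Gb":"F#", "Ab":"G#", "Bb":"A#"}
--
-- def norm_note(n: str) -> str:
--     return ENH_EQ.get(n, n).upper()
--
-- def note_to_idx(n: str) -> int:
--     return NOTES_SHARP.index(norm_note(n))
--
-- TETRAD_INTERVALS = {
--     "maj7": [0, 4, 7, 11],
--     "min7": [0, 3, 7, 10],
--     "7":    [0, 4, 7, 10],
--     "m7b5": [0, 3, 6, 10],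
--     "dim7": [0, 3, 6, 9],
-- }
--
-- def tetrad_pitches(root: str, quality: str, inversion: int = 0):
--     if quality not in TETRAD_INTERVALS:
--         raise ValueError("quality deve ser: maj7|min7|7|m7b5|dim7")
--     root_idx = note_to_idx(root)
--     ints = TETRAD_INTERVALS[quality]
--     k = inversion % 4
--     return [(root_idx + ints[(i + k) % 4]) % 12 for i in range(4)]
-- ===== Notes on version B (the rewrite author's own statement) =====
-- stated objective: simpler
-- what changed: B replaces A's intermediate un-rotated list and repeated rotate-by-slicing loop with a single comprehension that folds inversion % 4 into the interval index, building the inverted chord directly.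
import Mathlib
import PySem

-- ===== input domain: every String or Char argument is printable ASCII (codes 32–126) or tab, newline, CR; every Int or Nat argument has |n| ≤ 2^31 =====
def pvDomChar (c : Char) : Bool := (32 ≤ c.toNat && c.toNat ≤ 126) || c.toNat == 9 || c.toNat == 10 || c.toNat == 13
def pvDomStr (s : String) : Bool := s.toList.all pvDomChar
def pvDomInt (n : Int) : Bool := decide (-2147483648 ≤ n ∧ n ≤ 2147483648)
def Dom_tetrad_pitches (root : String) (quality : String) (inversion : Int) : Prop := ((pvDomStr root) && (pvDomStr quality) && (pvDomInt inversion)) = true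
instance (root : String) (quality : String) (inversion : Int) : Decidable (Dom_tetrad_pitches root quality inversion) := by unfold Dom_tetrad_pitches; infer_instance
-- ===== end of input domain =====

-- B builds the inverted chord directly in one comprehension by folding the inversion into the interval index, instead of A's rotate-a-list loop; equal wherever A returns (Pre_ excludes A's ValueError inputs).

-- ===== PORT A =====
def pvNotesSharp : List String := ["C","C#","D","D#","E","F","F#","G","G#","A","A#","B"]

def pvEnhEq : PySem.Dict String String :=
  PySem.Dict.ofList [("Db","C#"),("Eb","D#"),("Gb","F#"),("Ab","G#"),("Bb","A#")]

def pvNormNote (n : String) : String := PySem.Str.upper (PySem.Dict.getD pvEnhEq n n)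

-- NOTES_SHARP.index(...) raises ValueError when absent; Pre_ excludes that, so the port returns the index via index? (0 outside Pre_)
def pvNoteToIdx? (n : String) : Option Nat := PySem.List.index? pvNotesSharp (pvNormNote n)

def pvTetradIntervals : PySem.Dict String (List Int) :=
  PySem.Dict.ofList [("maj7",[0,4,7,11]),("min7",[0,3,7,10]),("7",[0,4,7,10]),("m7b5",[0,3,6,10]),("dim7",[0,3,6,9])]

def tetrad_pitches (root : String) (quality : String) (inversion : Int) : List Int :=
  match PySem.Dict.get? pvTetradIntervals quality with
  | none => []  -- Python raises ValueError; outside Pre_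
  | some ints =>
    match pvNoteToIdx? root with
    | none => []  -- Python raises ValueError; outside Pre_
    | some ri =>
      let pcs := ints.map (fun x => PySem.Int.mod ((ri : Int) + x) 12)
      (PySem.List.pyRange 0 (PySem.Int.mod inversion 4) 1).foldl
        (fun pcs _ => PySem.List.slice pcs (some 1) none ++ PySem.List.slice pcs none (some 1)) pcs

-- ===== PORT B =====
def tetrad_pitches_alt (root : String) (quality : String) (inversion : Int) : List Int :=
  match PySem.Dict.get? pvTetradIntervals quality with
  | none => []  -- Python raises ValueError; outside Pre_
  | some ints =>
    match pvNoteToIdx? root with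
    | none => []  -- Python raises ValueError; outside Pre_
    | some ri =>
      let k := PySem.Int.mod inversion 4
      (PySem.List.pyRange 0 4 1).map
        (fun i => PySem.Int.mod ((ri : Int) + PySem.List.pyGetD ints (PySem.Int.mod (i + k) 4) 0) 12)

-- ===== PRECONDITION & SPEC =====
-- Pre_ excludes exactly the inputs on which A raises ValueError: an unknown quality, or a root whose normal form is not in NOTES_SHARP.
def Pre_tetrad_pitches (root : String) (quality : String) (inversion : Int) : Prop :=
  (PySem.Dict.contains pvTetradIntervals quality = true) ∧
  (PySem.List.index? pvNotesSharp (pvNormNote root)).isSome = true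

instance (root : String) (quality : String) (inversion : Int) : Decidable (Pre_tetrad_pitches root quality inversion) := by
  unfold Pre_tetrad_pitches; infer_instance

def pvWitness_tetrad_pitches : String × String × Int := ("Db", "min7", 5)

def Spec_tetrad_pitches (root : String) (quality : String) (inversion : Int) (out : List Int) : Prop := out = tetrad_pitches_alt root quality inversion
instance (root : String) (quality : String) (inversion : Int) (out : List Int) : Decidable (Spec_tetrad_pitches root quality inversion out) := by unfold Spec_tetrad_pitches; infer_instance

-- ===== CLAIM (what is proved, stated in full; the proofs are below) =====
def Claim_equal_tetrad_pitches : Prop := ∀ (root : String) (quality : String) (inversion : Int), Dom_tetrad_pitches root quality inversion → Pre_tetrad_pitches root quality inversion → Spec_tetrad_pitches root quality inversion (tetrad_pitches root quality inversion)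

-- ===== LEMMAS AND PROOFS =====

-- rotating the 4-element pitch list m times (0 ≤ m < 4) equals B's index-shifted comprehension
theorem rot4 (ri x0 x1 x2 x3 m : Int) (h0 : 0 ≤ m) (h4 : m < 4) :
    (PySem.List.pyRange 0 m 1).foldl
      (fun pcs _ => PySem.List.slice pcs (some 1) none ++ PySem.List.slice pcs none (some 1))
      (List.map (fun x => PySem.Int.mod (ri + x) 12) [x0,x1,x2,x3])
    = (PySem.List.pyRange 0 4 1).map
        (fun i => PySem.Int.mod (ri + PySem.List.pyGetD [x0,x1,x2,x3] (PySem.Int.mod (i + m) 4) 0) 12) := by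
  interval_cases m <;>
    simp [PySem.List.pyRange, PySem.List.slice, PySem.List.pyGetD, PySem.Int.mod,
          PySem.List.clampIdx, List.range_succ]

-- ===== VERDICT (by name: the statement is the Claim_ definition above) =====
theorem tetrad_pitches_spec : Claim_equal_tetrad_pitches := by
  intro root quality inversion _ hpre
  obtain ⟨hq, hr⟩ := hpre
  unfold Spec_tetrad_pitches tetrad_pitches tetrad_pitches_alt
  obtain ⟨ri, hri⟩ := Option.isSome_iff_exists.mp hr
  have hidx : pvNoteToIdx? root = some ri := hri
  have hm0 : 0 ≤ PySem.Int.mod inversion 4 := PySem.Int.mod_nonneg inversion (by norm_num)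
  have hm4 : PySem.Int.mod inversion 4 < 4 := PySem.Int.mod_lt inversion (by norm_num)
  have hk : quality ∈ PySem.Dict.keys pvTetradIntervals :=
    (PySem.Dict.contains_iff_mem_keys pvTetradIntervals quality).mp hq
  have hkeys : PySem.Dict.keys pvTetradIntervals = ["maj7","min7","7","m7b5","dim7"] := by decide
  rw [hkeys] at hk
  simp only [List.mem_cons, List.not_mem_nil, or_false] at hk
  rcases hk with h | h | h | h | h <;> subst h
  · have hg : PySem.Dict.get? pvTetradIntervals "maj7" = some [0,4,7,11] := by decide
    simp only [hg, hidx]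
    exact rot4 (ri : Int) _ _ _ _ _ hm0 hm4
  · have hg : PySem.Dict.get? pvTetradIntervals "min7" = some [0,3,7,10] := by decide
    simp only [hg, hidx]
    exact rot4 (ri : Int) _ _ _ _ _ hm0 hm4
  · have hg : PySem.Dict.get? pvTetradIntervals "7" = some [0,4,7,10] := by decide
    simp only [hg, hidx]
    exact rot4 (ri : Int) _ _ _ _ _ hm0 hm4
  · have hg : PySem.Dict.get? pvTetradIntervals "m7b5" = some [0,3,6,10] := by decide
    simp only [hg, hidx]
    exact rot4 (ri : Int) _ _ _ _ _ hm0 hm4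
  · have hg : PySem.Dict.get? pvTetradIntervals "dim7" = some [0,3,6,9] := by decide
    simp only [hg, hidx]
    exact rot4 (ri : Int) _ _ _ _ _ hm0 hm4
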